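-- pv_equiv track=rewrite | github.com/benquick123/code-profiling | code/batch-2/vse-naloge-brez-testov/DN6-M-240.py | prvi_tvit
-- ===== SOURCE A (Python) =====
-- def avtor(tvit):
--     znaki = list(tvit)
--     i = 0
--     while i < len(znaki):
--         if znaki[i] == ":":
--             break
--         i = i + 1
--
--     tab = []
--     j = 0
--     while j < i:
--         tab.append(znaki[j])
--         j = j + 1
--
--     avtor = "".join(tab)
--
--     return avtor
--
-- def besedilo(tvit):
--     znaki = list(tvit)
--     tab = []
--     stevec = 0
--
--     while stevec < len(znaki):
--         if znaki[stevec] == ":":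
--             break
--         stevec = stevec + 1
--
--     stevec = stevec + 2
--
--     while stevec < len(znaki):
--         tab.append(znaki[stevec])
--         stevec = stevec + 1
--
--     return "".join(tab)
--
-- def prvi_tvit(tviti):
--     slovar = {}
--     stevec = 0
--     while stevec < len(tviti):
--         if avtor(tviti[stevec]) not in slovar:
--             slovar[avtor(tviti[stevec])] = besedilo(tviti[stevec])
--         stevec = stevec + 1
--     return slovar
-- ===== SOURCE B (Python) =====
-- def prvi_tvit(tviti):
--     slovar = {}
--     for tvit in tviti:
--         head, _, tail = tvit.partition(":")
--         slovar.setdefault(head, tail[1:])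
--     return slovar
-- ===== Notes on version B (the rewrite author's own statement) =====
-- stated objective: simpler
-- what changed: Replaces the two manual character-scanning helpers (each tweet scanned three times, the author computed twice) by a single str.partition per tweet with setdefault building the dict in one pass.
import Mathlib
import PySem

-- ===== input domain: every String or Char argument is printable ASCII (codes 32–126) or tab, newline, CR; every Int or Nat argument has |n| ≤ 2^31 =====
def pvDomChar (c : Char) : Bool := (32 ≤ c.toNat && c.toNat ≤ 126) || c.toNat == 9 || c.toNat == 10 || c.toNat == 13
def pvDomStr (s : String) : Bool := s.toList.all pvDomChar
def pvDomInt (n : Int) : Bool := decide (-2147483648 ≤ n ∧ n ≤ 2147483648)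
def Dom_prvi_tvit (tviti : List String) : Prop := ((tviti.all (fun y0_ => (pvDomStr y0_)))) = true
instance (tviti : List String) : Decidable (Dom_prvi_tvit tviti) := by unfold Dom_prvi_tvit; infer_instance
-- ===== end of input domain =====

-- B replaces A's manual character-scan helpers (three scans per tweet, author computed twice)
-- by one partition-at-first-colon per tweet with setdefault; objective: simpler.


-- ===== PORT A =====
-- first while loop of avtor/besedilo: index of the first ':' (= length if none)
def pvColonIdx : List Char → Nat
  | [] => 0
  | c :: cs => if c = ':' then 0 else pvColonIdx cs + 1

-- second while loop of avtor: append znaki[j] for j < i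
def pvTakeLoop : List Char → Nat → List Char
  | _, 0 => []
  | [], _ + 1 => []
  | c :: cs, n + 1 => c :: pvTakeLoop cs n

-- second while loop of besedilo: append znaki[stevec..]
def pvDropLoop : List Char → Nat → List Char
  | zn, 0 => zn
  | [], _ + 1 => []
  | _ :: cs, n + 1 => pvDropLoop cs n

def pvAvtor (tvit : String) : String :=
  let znaki := tvit.toList
  String.ofList (pvTakeLoop znaki (pvColonIdx znaki))

def pvBesedilo (tvit : String) : String :=
  let znaki := tvit.toList
  String.ofList (pvDropLoop znaki (pvColonIdx znaki + 2))

def prvi_tvit (tviti : List String) : List (String × String) :=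
  (tviti.foldl (fun slovar t =>
      if slovar.contains (pvAvtor t) then slovar
      else slovar.insert (pvAvtor t) (pvBesedilo t))
    (PySem.Dict.empty : PySem.Dict String String)).items

-- ===== PORT B =====
-- str.partition(':') head / tail; body = tail[1:]
def prvi_tvit_alt (tviti : List String) : List (String × String) :=
  (tviti.foldl (fun slovar t =>
      let zn := t.toList
      let head := zn.takeWhile (fun c => !(c == ':'))
      let tail := (zn.dropWhile (fun c => !(c == ':'))).drop 1
      slovar.setdefault (String.ofList head) (String.ofList (tail.drop 1)))
    (PySem.Dict.empty : PySem.Dict String String)).items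

-- ===== PRECONDITION & SPEC =====
def Spec_prvi_tvit (tviti : List String) (out : List (String × String)) : Prop := out = prvi_tvit_alt tviti
instance (tviti : List String) (out : List (String × String)) : Decidable (Spec_prvi_tvit tviti out) := by unfold Spec_prvi_tvit; infer_instance

-- ===== CLAIM (what is proved, stated in full; the proofs are below) =====
def Claim_equal_prvi_tvit : Prop := ∀ (tviti : List String), Dom_prvi_tvit tviti → Spec_prvi_tvit tviti (prvi_tvit tviti)

-- ===== LEMMAS AND PROOFS =====
lemma pvTakeLoop_colon (zn : List Char) :
    pvTakeLoop zn (pvColonIdx zn) = zn.takeWhile (fun c => !(c == ':')) := by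
  induction zn with
  | nil => rfl
  | cons c cs ih =>
    by_cases h : c = ':'
    · simp [pvColonIdx, pvTakeLoop, h, List.takeWhile]
    · have hb : (c == ':') = false := by simp [h]
      simp [pvColonIdx, h, pvTakeLoop, List.takeWhile, hb, ih]

lemma pvDropLoop_eq_drop (zn : List Char) (n : Nat) : pvDropLoop zn n = zn.drop n := by
  induction zn generalizing n with
  | nil => cases n <;> rfl
  | cons c cs ih => cases n with
    | zero => rfl
    | succ m => simpa [pvDropLoop] using ih m

lemma pvDrop_colon (zn : List Char) :
    pvDropLoop zn (pvColonIdx zn + 2) =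
      ((zn.dropWhile (fun c => !(c == ':'))).drop 1).drop 1 := by
  induction zn with
  | nil => rfl
  | cons c cs ih =>
    by_cases h : c = ':'
    · simp [pvColonIdx, h, List.dropWhile, pvDropLoop_eq_drop]
    · have hb : (c == ':') = false := by simp [h]
      have hn : pvColonIdx (c :: cs) + 2 = (pvColonIdx cs + 2) + 1 := by
        simp [pvColonIdx, h]
      rw [hn]
      simp [pvDropLoop, List.dropWhile, hb, ih]

lemma pvStep_eq (d : PySem.Dict String String) (t : String) :
    (if d.contains (pvAvtor t) then d else d.insert (pvAvtor t) (pvBesedilo t)) =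
      (let zn := t.toList
       let head := zn.takeWhile (fun c => !(c == ':'))
       let tail := (zn.dropWhile (fun c => !(c == ':'))).drop 1
       d.setdefault (String.ofList head) (String.ofList (tail.drop 1))) := by
  have hk : String.ofList (t.toList.takeWhile (fun c => !(c == ':'))) = pvAvtor t := by
    simp [pvAvtor, pvTakeLoop_colon]
  have hv : String.ofList (((t.toList.dropWhile (fun c => !(c == ':'))).drop 1).drop 1)
      = pvBesedilo t := by
    simp [pvBesedilo, pvDrop_colon]
  simp only [hk, hv]
  cases h : d.contains (pvAvtor t)
  · simp [PySem.Dict.setdefault_of_not_contains (h := h)]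
  · simp [PySem.Dict.setdefault_of_contains (h := h)]

lemma pvFold_eq (tviti : List String) (d : PySem.Dict String String) :
    tviti.foldl (fun slovar t =>
      if slovar.contains (pvAvtor t) then slovar
      else slovar.insert (pvAvtor t) (pvBesedilo t)) d =
    tviti.foldl (fun slovar t =>
      let zn := t.toList
      let head := zn.takeWhile (fun c => !(c == ':'))
      let tail := (zn.dropWhile (fun c => !(c == ':'))).drop 1
      slovar.setdefault (String.ofList head) (String.ofList (tail.drop 1))) d := by
  have hf : (fun (slovar : PySem.Dict String String) (t : String) =>
      if slovar.contains (pvAvtor t) then slovar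
      else slovar.insert (pvAvtor t) (pvBesedilo t)) =
      (fun (slovar : PySem.Dict String String) (t : String) =>
        let zn := t.toList
        let head := zn.takeWhile (fun c => !(c == ':'))
        let tail := (zn.dropWhile (fun c => !(c == ':'))).drop 1
        slovar.setdefault (String.ofList head) (String.ofList (tail.drop 1))) := by
    funext d t
    exact pvStep_eq d t
  rw [hf]

-- ===== VERDICT (by name: the statement is the Claim_ definition above) =====
theorem prvi_tvit_spec : Claim_equal_prvi_tvit := by
  intro tviti _
  unfold Spec_prvi_tvit prvi_tvit prvi_tvit_alt
  rw [pvFold_eq]
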